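-- pv_equiv track=rewrite | github.com/pypi-data/pypi-mirror-351 | packages/arc-eval/arc_eval-0.2.5-py3-none-any.whl/agent_eval/core/improvement_planner.py | _determine_priority_from_scenarios
-- ===== SOURCE A (Python) =====
-- from typing import Dict, List, Any, Optional, Tuple
--
-- def _determine_priority_from_scenarios(scenarios: List[Dict]) -> str:
--     """Determine priority based on scenario severities."""
--     severities = [s.get('severity', 'medium').lower() for s in scenarios]
--
--     if any(s == 'critical' for s in severities):
--         return "CRITICAL"
--     elif any(s == 'high' for s in severities):
--         return "HIGH"
--     elif any(s == 'medium' for s in severities):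
--         return "MEDIUM"
--     else:
--         return "LOW"
-- ===== SOURCE B (Python) =====
-- def _determine_priority_from_scenarios(scenarios):
--     """Determine priority based on scenario severities."""
--     rank = {'critical': 3, 'high': 2, 'medium': 1}
--     best = 0
--     for s in scenarios:
--         best = max(best, rank.get(s.get('severity', 'medium').lower(), 0))
--     return {3: 'CRITICAL', 2: 'HIGH', 1: 'MEDIUM', 0: 'LOW'}[best]
-- ===== Notes on version B (the rewrite author's own statement) =====
-- stated objective: simpler
-- what changed: Replaces the three ordered any-scans over a materialized severities list with a single max-reduction to a numeric rank plus a reverse table lookup.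
import Mathlib
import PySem

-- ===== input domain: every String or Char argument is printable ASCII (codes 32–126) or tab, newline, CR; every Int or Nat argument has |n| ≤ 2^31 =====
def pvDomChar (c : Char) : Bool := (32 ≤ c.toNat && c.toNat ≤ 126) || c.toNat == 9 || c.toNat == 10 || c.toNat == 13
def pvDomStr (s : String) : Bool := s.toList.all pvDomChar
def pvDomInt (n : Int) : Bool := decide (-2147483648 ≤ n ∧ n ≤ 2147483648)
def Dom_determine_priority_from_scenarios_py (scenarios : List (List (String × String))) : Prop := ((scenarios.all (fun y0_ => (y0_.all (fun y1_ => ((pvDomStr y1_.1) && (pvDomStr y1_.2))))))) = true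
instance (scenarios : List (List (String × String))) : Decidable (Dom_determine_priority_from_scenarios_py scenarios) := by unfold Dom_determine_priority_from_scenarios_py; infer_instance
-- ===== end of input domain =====

-- B replaces A's three ordered any-scans with one max-reduction to a numeric rank plus a reverse
-- table lookup (objective: simpler single pass; same asymptotic cost).

-- ===== PORT A =====
def determine_priority_from_scenarios_py (scenarios : List (List (String × String))) : String :=
  -- severities = [s.get('severity', 'medium').lower() for s in scenarios]
  if (scenarios.map (fun s => PySem.Str.lower ((PySem.Dict.ofList s).getD "severity" "medium"))).any
      (fun s => s == "critical") then "CRITICAL"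
  else if (scenarios.map (fun s => PySem.Str.lower ((PySem.Dict.ofList s).getD "severity" "medium"))).any
      (fun s => s == "high") then "HIGH"
  else if (scenarios.map (fun s => PySem.Str.lower ((PySem.Dict.ofList s).getD "severity" "medium"))).any
      (fun s => s == "medium") then "MEDIUM"
  else "LOW"

-- ===== PORT B =====
def pvRankMap : PySem.Dict String Int := PySem.Dict.ofList [("critical", 3), ("high", 2), ("medium", 1)]
def pvLevelMap : PySem.Dict Int String := PySem.Dict.ofList [(3, "CRITICAL"), (2, "HIGH"), (1, "MEDIUM"), (0, "LOW")]

def determine_priority_from_scenarios_py_alt (scenarios : List (List (String × String))) : String :=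
  -- best = running max of the rank of each scenario's lowered severity
  ((pvLevelMap.get? (scenarios.foldl
      (fun best s =>
        max best (pvRankMap.getD (PySem.Str.lower ((PySem.Dict.ofList s).getD "severity" "medium")) 0)) 0)).getD "")
  -- Python's `{...}[best]`: the key is always present since best ∈ {0,1,2,3}; get? is some there

-- ===== PRECONDITION & SPEC =====
def Spec_determine_priority_from_scenarios_py (scenarios : List (List (String × String))) (out : String) : Prop := out = determine_priority_from_scenarios_py_alt scenarios
instance (scenarios : List (List (String × String))) (out : String) : Decidable (Spec_determine_priority_from_scenarios_py scenarios out) := by unfold Spec_determine_priority_from_scenarios_py; infer_instance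

-- ===== CLAIM (what is proved, stated in full; the proofs are below) =====
def Claim_equal_determine_priority_from_scenarios_py : Prop := ∀ (scenarios : List (List (String × String))), Dom_determine_priority_from_scenarios_py scenarios → Spec_determine_priority_from_scenarios_py scenarios (determine_priority_from_scenarios_py scenarios)

-- ===== LEMMAS AND PROOFS =====

/-- The lowered severity string of one scenario (proof-side abbreviation). -/
def pvSev (s : List (String × String)) : String :=
  PySem.Str.lower ((PySem.Dict.ofList s).getD "severity" "medium")

theorem pvRank_eq (k : String) :
    pvRankMap.getD k 0 = if k = "critical" then 3 else if k = "high" then 2 else if k = "medium" then 1 else 0 := by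
  by_cases h1 : k = "critical" <;> by_cases h2 : k = "high" <;> by_cases h3 : k = "medium" <;>
    simp [pvRankMap, PySem.Dict.ofList, PySem.Dict.update, PySem.Dict.getD_insert,
      PySem.Dict.getD_empty, h1, h2, h3]

theorem pvRank_mem (k : String) :
    pvRankMap.getD k 0 = 0 ∨ pvRankMap.getD k 0 = 1 ∨ pvRankMap.getD k 0 = 2 ∨ pvRankMap.getD k 0 = 3 := by
  rw [pvRank_eq]; split_ifs <;> simp

theorem pvRank_eq3 (k : String) : pvRankMap.getD k 0 = 3 ↔ k = "critical" := by
  rw [pvRank_eq]; split_ifs <;> simp_all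

theorem pvRank_eq2 (k : String) : pvRankMap.getD k 0 = 2 ↔ k = "high" := by
  rw [pvRank_eq]; split_ifs <;> simp_all

theorem pvRank_eq1 (k : String) : pvRankMap.getD k 0 = 1 ↔ k = "medium" := by
  rw [pvRank_eq]; split_ifs <;> simp_all

/-- Characterisation of the max-fold over a list of ranks in {0,1,2,3}. -/
theorem pvMaxfold_spec (l : List Int) (acc : Int)
    (hl : ∀ x ∈ l, x = 0 ∨ x = 1 ∨ x = 2 ∨ x = 3)
    (ha : acc = 0 ∨ acc = 1 ∨ acc = 2 ∨ acc = 3) :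
    l.foldl max acc =
      (if acc = 3 ∨ (3 : Int) ∈ l then 3
       else if acc = 2 ∨ (2 : Int) ∈ l then 2
       else if acc = 1 ∨ (1 : Int) ∈ l then 1 else 0) := by
  induction l generalizing acc with
  | nil => rcases ha with h | h | h | h <;> subst h <;> simp
  | cons x l ih =>
    have hx := hl x (by simp)
    have hrest : ∀ y ∈ l, y = 0 ∨ y = 1 ∨ y = 2 ∨ y = 3 := fun y hy => hl y (by simp [hy])
    have hmax : max acc x = 0 ∨ max acc x = 1 ∨ max acc x = 2 ∨ max acc x = 3 := by
      rcases ha with h | h | h | h <;> rcases hx with h' | h' | h' | h' <;> subst h <;> subst h' <;> decide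
    rw [List.foldl_cons, ih (max acc x) hrest hmax]
    rcases ha with h | h | h | h <;> rcases hx with h' | h' | h' | h' <;> subst h <;> subst h' <;>
      simp

-- ===== VERDICT (by name: the statement is the Claim_ definition above) =====
theorem determine_priority_from_scenarios_py_spec : Claim_equal_determine_priority_from_scenarios_py := by
  intro scenarios _
  unfold Spec_determine_priority_from_scenarios_py determine_priority_from_scenarios_py
    determine_priority_from_scenarios_py_alt
  have hfold : scenarios.foldl
      (fun best s => max best (pvRankMap.getD (PySem.Str.lower ((PySem.Dict.ofList s).getD "severity" "medium")) 0)) 0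
      = (scenarios.map (fun s => pvRankMap.getD (pvSev s) 0)).foldl max 0 := by
    rw [List.foldl_map]; rfl
  have hmem : ∀ x ∈ scenarios.map (fun s => pvRankMap.getD (pvSev s) 0),
      x = 0 ∨ x = 1 ∨ x = 2 ∨ x = 3 := by
    intro x hx
    simp only [List.mem_map] at hx
    obtain ⟨s, _, rfl⟩ := hx
    exact pvRank_mem _
  have h3 : ((3 : Int) ∈ scenarios.map (fun s => pvRankMap.getD (pvSev s) 0)) ↔
      ((scenarios.map (fun s => PySem.Str.lower ((PySem.Dict.ofList s).getD "severity" "medium"))).any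
        (fun s => s == "critical")) = true := by
    simp [List.mem_map, List.any_map, List.any_eq_true, pvRank_eq3, pvSev]
  have h2 : ((2 : Int) ∈ scenarios.map (fun s => pvRankMap.getD (pvSev s) 0)) ↔
      ((scenarios.map (fun s => PySem.Str.lower ((PySem.Dict.ofList s).getD "severity" "medium"))).any
        (fun s => s == "high")) = true := by
    simp [List.mem_map, List.any_map, List.any_eq_true, pvRank_eq2, pvSev]
  have h1 : ((1 : Int) ∈ scenarios.map (fun s => pvRankMap.getD (pvSev s) 0)) ↔
      ((scenarios.map (fun s => PySem.Str.lower ((PySem.Dict.ofList s).getD "severity" "medium"))).any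
        (fun s => s == "medium")) = true := by
    simp [List.mem_map, List.any_map, List.any_eq_true, pvRank_eq1, pvSev]
  rw [hfold, pvMaxfold_spec _ 0 hmem (by simp)]
  simp only [show ((0:Int) = 3) ↔ False from by simp, show ((0:Int) = 2) ↔ False from by simp,
    show ((0:Int) = 1) ↔ False from by simp, false_or, h3, h2, h1]
  split_ifs <;> rfl
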